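-- pv_equiv track=rewrite | github.com/Natniif/euler-solutions | euler_solutions/euler_5.py | divisible
-- ===== SOURCE A (Python) =====
-- def divisible(n):
--     i = 2
--     while i < 21:
--         if n%i ==0:
--             i += 1
--         else:
--             return False
--     return True
-- ===== SOURCE B (Python) =====
-- def divisible(n):
--     # lcm(2..20) = 232792560; divisibility by all of 2..20 is one modulo test
--     return n % 232792560 == 0
-- ===== Notes on version B (the rewrite author's own statement) =====
-- stated objective: simpler
-- what changed: Replaced the incremental while-loop of separate modulo tests for each divisor by a single closed-form divisibility test against lcm(2..20) = 232792560.
import Mathlib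
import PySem

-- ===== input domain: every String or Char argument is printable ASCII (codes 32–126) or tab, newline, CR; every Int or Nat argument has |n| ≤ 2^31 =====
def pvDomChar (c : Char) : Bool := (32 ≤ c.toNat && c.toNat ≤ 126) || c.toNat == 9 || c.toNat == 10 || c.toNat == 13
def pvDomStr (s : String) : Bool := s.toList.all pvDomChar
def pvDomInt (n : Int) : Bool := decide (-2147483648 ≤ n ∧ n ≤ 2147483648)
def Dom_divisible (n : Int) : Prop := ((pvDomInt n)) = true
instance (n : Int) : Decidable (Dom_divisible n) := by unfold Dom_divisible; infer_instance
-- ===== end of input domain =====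

-- B replaces A's incremental loop of 19 modulo tests by one divisibility test against lcm(2..20) = 232792560 (simpler).


-- ===== PORT A =====
-- the while-loop: i counts up from 2; fuel = 21 - i iterations suffice
def divisibleGo (n : Int) : Nat → Int → Bool
  | 0, _ => true
  | fuel + 1, i =>
      if i < 21 then
        if PySem.Int.mod n i = 0 then divisibleGo n fuel (i + 1) else false
      else true

def divisible (n : Int) : Bool := divisibleGo n 25 2

-- ===== PORT B =====
def divisible_alt (n : Int) : Bool := decide (PySem.Int.mod n 232792560 = 0)

-- ===== PRECONDITION & SPEC =====
def Spec_divisible (n : Int) (out : Bool) : Prop := out = divisible_alt n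
instance (n : Int) (out : Bool) : Decidable (Spec_divisible n out) := by unfold Spec_divisible; infer_instance

-- ===== CLAIM (what is proved, stated in full; the proofs are below) =====
def Claim_equal_divisible : Prop := ∀ (n : Int), Dom_divisible n → Spec_divisible n (divisible n)

-- ===== LEMMAS AND PROOFS =====
theorem divisible_eq_alt (n : Int) : divisible n = divisible_alt n := by
  have h : ∀ k : Int, PySem.Int.mod n k = 0 ↔ k ∣ n := fun k => PySem.Int.mod_eq_zero_iff_dvd n k
  simp only [divisible, divisibleGo, divisible_alt]
  norm_num [h]
  simp only [← Bool.decide_and, decide_eq_decide]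
  constructor
  · rintro ⟨h2, h3, h4, h5, h6, h7, h8, h9, h10, h11, h12, h13, h14, h15, h16, h17, h18, h19, h20⟩
    -- lcm(2..20) = 232792560 = 16 * 9 * 5 * 7 * 11 * 13 * 17 * 19 (pairwise coprime factors)
    have cop : ∀ a b : Int, Int.gcd a b = 1 → IsCoprime a b :=
      fun a b hab => Int.isCoprime_iff_gcd_eq_one.mpr hab
    have d144 : (144 : Int) ∣ n := (cop 16 9 (by decide)).mul_dvd h16 h9
    have d720 : (720 : Int) ∣ n := (cop 144 5 (by decide)).mul_dvd d144 h5
    have d5040 : (5040 : Int) ∣ n := (cop 720 7 (by decide)).mul_dvd d720 h7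
    have d55440 : (55440 : Int) ∣ n := (cop 5040 11 (by decide)).mul_dvd d5040 h11
    have d720720 : (720720 : Int) ∣ n := (cop 55440 13 (by decide)).mul_dvd d55440 h13
    have d12252240 : (12252240 : Int) ∣ n := (cop 720720 17 (by decide)).mul_dvd d720720 h17
    exact (cop 12252240 19 (by decide)).mul_dvd d12252240 h19
  · intro hl
    refine ⟨?_, ?_, ?_, ?_, ?_, ?_, ?_, ?_, ?_, ?_, ?_, ?_, ?_, ?_, ?_, ?_, ?_, ?_, ?_⟩ <;>
      exact dvd_trans (by norm_num) hl

-- ===== VERDICT (by name: the statement is the Claim_ definition above) =====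
theorem divisible_spec : Claim_equal_divisible := by
  intro n _
  unfold Spec_divisible
  exact divisible_eq_alt n
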